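-- pv_equiv track=rewrite | github.com/megafyk/scratch2test | lc/dp/knapsack/pizza-with-3n-slices.py | mx
-- ===== SOURCE A (Python) =====
-- def mx(n, slices):
--     m = len(slices)
--     dp1 = [0] * (n + 1)
--     dp2 = [0] * (n + 1)
--     for i in range(1, m + 1):
--         tmp = [0] * (n + 1)
--         for j in range(1, n + 1):
--             tmp[j] = max(dp1[j], slices[i - 1] + (dp2[j - 1] if i >= 2 else 0))  # (not take)/(take) slices[i]
--         dp2, dp1 = dp1, tmp
--     return dp1[n]
-- ===== SOURCE B (Python) =====
-- def mx(n, slices):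
--     # Transposed DP: one pass over positions per allowed pick-count, with a running
--     # prefix max; row[i] = best total using at most the current count among the
--     # first i slices (no two adjacent).
--     m = len(slices)
--     row = [0] * (m + 1)
--     for _ in range(n):
--         new = [0] * (m + 1)
--         for i in range(1, m + 1):
--             take = slices[i - 1] + (row[i - 2] if i >= 2 else 0)
--             new[i] = take if take > new[i - 1] else new[i - 1]
--         row = new
--     return row[m]
-- ===== Notes on version B (the rewrite author's own statement) =====
-- stated objective: alternative
-- what changed: B transposes the DP: instead of A's pass per slice updating a count-indexed row, B does one pass per allowed pick-count over a position-indexed row with a running prefix max; same O(m*n) cost, different loop structure and state.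
import Mathlib
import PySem

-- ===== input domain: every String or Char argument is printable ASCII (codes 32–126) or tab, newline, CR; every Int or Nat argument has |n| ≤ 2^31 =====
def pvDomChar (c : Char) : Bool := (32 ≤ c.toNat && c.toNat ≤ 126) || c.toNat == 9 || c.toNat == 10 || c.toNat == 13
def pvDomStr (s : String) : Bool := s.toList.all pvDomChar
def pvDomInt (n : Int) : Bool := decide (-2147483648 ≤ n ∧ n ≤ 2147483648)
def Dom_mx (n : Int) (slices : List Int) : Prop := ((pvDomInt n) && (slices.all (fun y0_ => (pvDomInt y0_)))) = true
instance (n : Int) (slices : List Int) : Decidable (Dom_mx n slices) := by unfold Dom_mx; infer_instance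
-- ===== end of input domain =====

-- B transposes the DP (one pass per allowed pick-count over a position-indexed row with a
-- running prefix max) instead of A's pass per slice over a count-indexed row: an alternative
-- loop structure of the same cost. Equivalence is about the return value; neither mutates input.

-- ===== PORT A =====
-- xs[i] on a List for an index the Python keeps in range (under Pre_): total getD form of PySem.List.pyGetD
def pvGet (l : List Int) (i : Int) : Int := PySem.List.pyGetD l i 0
-- the Python dp rows are lists with O(1) read/write; ported as Array with read a[i] / write a[i] = v
-- (indices are kept nonnegative and in range by the loops, exact there)
def pvGetA (a : Array Int) (i : Int) : Int := a.getD i.toNat 0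
def pvSetA (a : Array Int) (i : Int) (v : Int) : Array Int := a.setIfInBounds i.toNat v

def mx (n : Int) (slices : List Int) : Int :=
  let m : Int := (slices.length : Int)
  let dp1 : Array Int := Array.replicate (n + 1).toNat 0
  let dp2 : Array Int := Array.replicate (n + 1).toNat 0
  let st :=
    (PySem.List.pyRange 1 (m + 1) 1).foldl
      (fun (st : Array Int × Array Int) i =>
        let tmp :=
          (PySem.List.pyRange 1 (n + 1) 1).foldl
            (fun tmp j =>
              pvSetA tmp j
                (max (pvGetA st.1 j)
                  (pvGet slices (i - 1) + (if 2 ≤ i then pvGetA st.2 (j - 1) else 0))))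
            (Array.replicate (n + 1).toNat 0)
        (tmp, st.1))
      (dp1, dp2)
  pvGetA st.1 n

-- ===== PORT B =====
def mx_alt (n : Int) (slices : List Int) : Int :=
  let m : Int := (slices.length : Int)
  let row : Array Int :=
    (PySem.List.pyRange 0 n 1).foldl
      (fun row _ =>
        (PySem.List.pyRange 1 (m + 1) 1).foldl
          (fun new i =>
            let take := pvGet slices (i - 1) + (if 2 ≤ i then pvGetA row (i - 2) else 0)
            pvSetA new i (if pvGetA new (i - 1) < take then take else pvGetA new (i - 1)))
          (Array.replicate (slices.length + 1) 0))
      (Array.replicate (slices.length + 1) 0)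
  pvGetA row m

-- ===== PRECONDITION & SPEC =====
-- Pre_ excludes exactly n < 0, where Python A raises IndexError (dp1[n] on the empty dp row).
def Pre_mx (n : Int) (slices : List Int) : Prop := 0 ≤ n
instance (n : Int) (slices : List Int) : Decidable (Pre_mx n slices) := by unfold Pre_mx; infer_instance
def pvWitness_mx : Int × List Int := (2, [1, 2, 3, 4])

def Spec_mx (n : Int) (slices : List Int) (out : Int) : Prop := out = mx_alt n slices
instance (n : Int) (slices : List Int) (out : Int) : Decidable (Spec_mx n slices out) := by unfold Spec_mx; infer_instance

-- ===== CLAIM (what is proved, stated in full; the proofs are below) =====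
def Claim_equal_mx : Prop := ∀ (n : Int) (slices : List Int), Dom_mx n slices → Pre_mx n slices → Spec_mx n slices (mx n slices)

-- ===== LEMMAS AND PROOFS =====

-- The common 2D value both programs tabulate: pvF s i j = A's dp row i at count j
def pvF (s : List Int) : Nat → Nat → Int
  | 0, _ => 0
  | _ + 1, 0 => 0
  | 1, _ + 1 => max 0 (s.getD 0 0)
  | i + 2, j + 1 => max (pvF s (i + 1) (j + 1)) (s.getD (i + 1) 0 + pvF s i j)

-- B's inner pass as a prefix-max scan against the previous column r
def pvScanB (s : List Int) (r : Nat → Int) : Nat → Int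
  | 0 => 0
  | i + 1 => max (pvScanB s r i) (s.getD i 0 + (if 1 ≤ i then r (i - 1) else 0))

lemma pvF_zero_col (s : List Int) (i : Nat) : pvF s i 0 = 0 := by
  cases i with
  | zero => rfl
  | succ k => cases k <;> rfl

lemma if_lt_eq_max (a b : Int) : (if a < b then b else a) = max a b := by
  split_ifs with h
  · exact (max_eq_right h.le).symm
  · exact (max_eq_left (not_lt.mp h)).symm

lemma replicate_eq_map_range (N : Nat) :
    List.replicate N (0 : Int) = (List.range N).map (fun _ => 0) := by
  simp

lemma set_map_range {α : Type} (N k : Nat) (v : Nat → α) (x : α) (hk : k < N) :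
    ((List.range N).map v).set k x = (List.range N).map (fun j => if j = k then x else v j) := by
  apply List.ext_getElem
  · simp
  · intro i h1 h2
    simp only [List.getElem_set, List.getElem_map, List.getElem_range]
    by_cases h : i = k
    · simp [h]
    · simp only [h, if_false]
      rw [if_neg (fun hh => h hh.symm)]

lemma getD_map_range0 (v : Nat → Int) (N k : Nat) (hk : k < N) :
    ((List.range N).map v).getD k (0 : Int) = v k := by
  simp [List.getD, hk]

lemma pvGetA_toList (a : Array Int) (i : Int) : pvGetA a i = a.toList.getD i.toNat 0 := by
  rcases a with ⟨l⟩
  simp only [pvGetA, Array.getD, List.getD]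
  split
  · next h =>
    rw [List.getElem?_eq_getElem (by simpa using h)]
    rfl
  · next h =>
    rw [List.getElem?_eq_none (by simpa using not_lt.mp h)]
    rfl

-- read of an array whose contents are a tabulated function, at a Nat-cast index
lemma pvGetA_map_range (a : Array Int) (v : Nat → Int) (N k : Nat)
    (ha : a.toList = (List.range N).map v) (hk : k < N) :
    pvGetA a (k : Int) = v k := by
  rw [pvGetA_toList, Int.toNat_natCast, ha, getD_map_range0 _ _ _ hk]

-- A's inner loop: builds the new count-indexed row from rows a1 (dp1) and a2 (dp2)
lemma innerA (slices : List Int) (a1 a2 : Array Int) (d1 d2 : Nat → Int) (i : Int) (N : Nat)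
    (h1 : ∀ j : Nat, j ≤ N → pvGetA a1 (j : Int) = d1 j)
    (h2 : ∀ j : Nat, j ≤ N → pvGetA a2 (j : Int) = d2 j) :
    ∀ J : Nat, J ≤ N →
      ((PySem.List.pyRange 1 ((J : Int) + 1) 1).foldl
        (fun tmp j =>
          pvSetA tmp j
            (max (pvGetA a1 j)
              (pvGet slices (i - 1) + (if 2 ≤ i then pvGetA a2 (j - 1) else 0))))
        (Array.replicate (N + 1) 0)).toList
      = (List.range (N + 1)).map
          (fun j => if 1 ≤ j ∧ j ≤ J then
              max (d1 j) (pvGet slices (i - 1) + (if 2 ≤ i then d2 (j - 1) else 0))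
            else 0) := by
  intro J
  induction J with
  | zero =>
    intro _
    rw [show ((0 : Nat) : Int) + 1 = 1 by norm_num,
        PySem.List.pyRange_one_eq_nil (a := 1) (b := 1) (by norm_num), List.foldl_nil,
        Array.toList_replicate, replicate_eq_map_range]
    apply List.map_congr_left
    intro j hj
    simp only [List.mem_range] at hj
    rw [if_neg (by omega)]
  | succ J ih =>
    intro hJ
    have hc : ((J + 1 : Nat) : Int) + 1 = (((J : Nat) : Int) + 1) + 1 := by push_cast; ring
    rw [hc, PySem.List.pyRange_one_succ_right (a := 1) (b := ((J : Nat) : Int) + 1) (by omega),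
        List.foldl_append]
    simp only [List.foldl_cons, List.foldl_nil]
    have key : ∀ (F : Array Int),
        F.toList = (List.range (N + 1)).map
          (fun j => if 1 ≤ j ∧ j ≤ J then
              max (d1 j) (pvGet slices (i - 1) + (if 2 ≤ i then d2 (j - 1) else 0))
            else 0) →
        (pvSetA F (((J : Nat) : Int) + 1)
          (max (pvGetA a1 (((J : Nat) : Int) + 1))
            (pvGet slices (i - 1) +
              (if 2 ≤ i then pvGetA a2 ((((J : Nat) : Int) + 1) - 1) else 0)))).toList
        = (List.range (N + 1)).map
            (fun j => if 1 ≤ j ∧ j ≤ J + 1 then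
                max (d1 j) (pvGet slices (i - 1) + (if 2 ≤ i then d2 (j - 1) else 0))
              else 0) := by
      intro F hF
      have e1 : ((J : Int) + 1) = ((J + 1 : Nat) : Int) := by push_cast; ring
      have e2 : ((J : Int) + 1) - 1 = ((J : Nat) : Int) := by push_cast; ring
      rw [e2, h2 J (by omega), e1, h1 (J + 1) hJ]
      simp only [pvSetA, Array.toList_setIfInBounds, Int.toNat_natCast]
      rw [hF, set_map_range (N + 1) (J + 1) _ _ (by omega)]
      apply List.map_congr_left
      intro j hj
      simp only [List.mem_range] at hj
      by_cases hjJ : j = J + 1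
      · subst hjJ
        simp
      · rw [if_neg hjJ]
        by_cases hle : 1 ≤ j ∧ j ≤ J
        · rw [if_pos hle, if_pos (show 1 ≤ j ∧ j ≤ J + 1 from ⟨hle.1, by omega⟩)]
        · rw [if_neg hle, if_neg (show ¬(1 ≤ j ∧ j ≤ J + 1) by omega)]
    exact key _ (ih (by omega))

-- B's inner loop: builds the new position-indexed row from the previous column a
lemma innerB (slices : List Int) (a : Array Int) (r : Nat → Int) (M : Nat)
    (h : ∀ k : Nat, k ≤ M → pvGetA a (k : Int) = r k) :
    ∀ I : Nat, I ≤ M →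
      ((PySem.List.pyRange 1 ((I : Int) + 1) 1).foldl
        (fun new i =>
          let take := pvGet slices (i - 1) + (if 2 ≤ i then pvGetA a (i - 2) else 0)
          pvSetA new i (if pvGetA new (i - 1) < take then take else pvGetA new (i - 1)))
        (Array.replicate (M + 1) 0)).toList
      = (List.range (M + 1)).map (fun k => if k ≤ I then pvScanB slices r k else 0) := by
  intro I
  induction I with
  | zero =>
    intro _
    rw [show ((0 : Nat) : Int) + 1 = 1 by norm_num,
        PySem.List.pyRange_one_eq_nil (a := 1) (b := 1) (by norm_num), List.foldl_nil,
        Array.toList_replicate, replicate_eq_map_range]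
    apply List.map_congr_left
    intro k hk
    by_cases h0 : k ≤ 0
    · rw [if_pos h0, show k = 0 by omega]; rfl
    · rw [if_neg h0]
  | succ I ih =>
    intro hI
    have hc : ((I + 1 : Nat) : Int) + 1 = (((I : Nat) : Int) + 1) + 1 := by push_cast; ring
    rw [hc, PySem.List.pyRange_one_succ_right (a := 1) (b := ((I : Nat) : Int) + 1) (by omega),
        List.foldl_append]
    simp only [List.foldl_cons, List.foldl_nil]
    have key : ∀ (F : Array Int),
        F.toList = (List.range (M + 1)).map (fun k => if k ≤ I then pvScanB slices r k else 0) →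
        ((fun new i =>
          let take := pvGet slices (i - 1) + (if 2 ≤ i then pvGetA a (i - 2) else 0)
          pvSetA new i (if pvGetA new (i - 1) < take then take else pvGetA new (i - 1)))
            F (((I : Nat) : Int) + 1)).toList
        = (List.range (M + 1)).map (fun k => if k ≤ I + 1 then pvScanB slices r k else 0) := by
      intro F hF
      have hprev : pvGetA F ((((I : Nat) : Int) + 1) - 1) = pvScanB slices r I := by
        rw [show (((I : Nat) : Int) + 1) - 1 = ((I : Nat) : Int) by ring,
            pvGetA_map_range F _ (M + 1) I hF (by omega), if_pos le_rfl]
      have htake : pvGet slices ((((I : Nat) : Int) + 1) - 1) +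
          (if 2 ≤ ((I : Nat) : Int) + 1 then pvGetA a ((((I : Nat) : Int) + 1) - 2) else 0) =
          slices.getD I 0 + (if 1 ≤ I then r (I - 1) else 0) := by
        cases I with
        | zero => simp [pvGet, pysem]
        | succ k =>
          rw [show (((k + 1 : Nat) : Int)) + 1 - 1 = ((k + 1 : Nat) : Int) by ring,
              show (((k + 1 : Nat) : Int)) + 1 - 2 = ((k : Nat) : Int) by push_cast; ring,
              if_pos (show (2 : Int) ≤ ((k + 1 : Nat) : Int) + 1 by push_cast; omega),
              h k (by omega), if_pos (show 1 ≤ k + 1 by omega)]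
          simp only [pvGet]
          rw [PySem.List.pyGetD_natCast]
          simp
      simp only [hprev, htake, if_lt_eq_max]
      have hmax : max (pvScanB slices r I) (slices.getD I 0 + (if 1 ≤ I then r (I - 1) else 0)) =
          pvScanB slices r (I + 1) := rfl
      rw [hmax]
      have e1 : ((I : Nat) : Int) + 1 = ((I + 1 : Nat) : Int) := by push_cast; ring
      rw [e1]
      simp only [pvSetA, Array.toList_setIfInBounds, Int.toNat_natCast]
      rw [hF, set_map_range (M + 1) (I + 1) _ _ (by omega)]
      apply List.map_congr_left
      intro k hk
      simp only [List.mem_range] at hk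
      by_cases hkI : k = I + 1
      · subst hkI; simp
      · rw [if_neg hkI]
        by_cases hle : k ≤ I
        · rw [if_pos hle, if_pos (by omega)]
        · rw [if_neg hle, if_neg (by omega)]
    exact key _ (ih (by omega))

lemma pvScanB_eq_pvF (s : List Int) (J : Nat) (i : Nat) :
    pvScanB s (fun k => pvF s k J) i = pvF s i (J + 1) := by
  induction i with
  | zero => rfl
  | succ k ih =>
    cases k with
    | zero => simp [pvScanB, pvF]
    | succ j =>
      have hstep : pvScanB s (fun k => pvF s k J) (j + 1 + 1) =
          max (pvScanB s (fun k => pvF s k J) (j + 1))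
            (s.getD (j + 1) 0 + (if 1 ≤ j + 1 then pvF s (j + 1 - 1) J else 0)) := rfl
      rw [hstep, ih]
      simp [pvF]

lemma wA_eq_pvF (s : List Int) (I j : Nat) :
    max (pvF s I (j + 1)) (s.getD I 0 + (if 1 ≤ I then pvF s (I - 1) j else 0)) =
      pvF s (I + 1) (j + 1) := by
  cases I with
  | zero => simp [pvF]
  | succ k => simp [pvF]

-- A's outer loop invariant: dp1 tabulates row I, dp2 row I-1
lemma outerA (slices : List Int) (N : Nat) :
    ∀ I : Nat, I ≤ slices.length →
      ((PySem.List.pyRange 1 ((I : Int) + 1) 1).foldl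
        (fun (st : Array Int × Array Int) i =>
          let tmp :=
            (PySem.List.pyRange 1 ((N : Int) + 1) 1).foldl
              (fun tmp j =>
                pvSetA tmp j
                  (max (pvGetA st.1 j)
                    (pvGet slices (i - 1) + (if 2 ≤ i then pvGetA st.2 (j - 1) else 0))))
              (Array.replicate (N + 1) 0)
          (tmp, st.1))
        (Array.replicate (N + 1) 0, Array.replicate (N + 1) 0)).1.toList
        = (List.range (N + 1)).map (pvF slices I) ∧
      ((PySem.List.pyRange 1 ((I : Int) + 1) 1).foldl
        (fun (st : Array Int × Array Int) i =>
          let tmp :=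
            (PySem.List.pyRange 1 ((N : Int) + 1) 1).foldl
              (fun tmp j =>
                pvSetA tmp j
                  (max (pvGetA st.1 j)
                    (pvGet slices (i - 1) + (if 2 ≤ i then pvGetA st.2 (j - 1) else 0))))
              (Array.replicate (N + 1) 0)
          (tmp, st.1))
        (Array.replicate (N + 1) 0, Array.replicate (N + 1) 0)).2.toList
        = (List.range (N + 1)).map (pvF slices (I - 1)) := by
  intro I
  induction I with
  | zero =>
    intro _
    rw [show ((0 : Nat) : Int) + 1 = 1 by norm_num,
        PySem.List.pyRange_one_eq_nil (a := 1) (b := 1) (by norm_num), List.foldl_nil]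
    have hz : (Array.replicate (N + 1) (0 : Int)).toList =
        (List.range (N + 1)).map (pvF slices 0) := by
      rw [Array.toList_replicate, replicate_eq_map_range]
      exact List.map_congr_left (fun j _ => rfl)
    exact ⟨hz, hz⟩
  | succ I ih =>
    intro hI
    have hc : ((I + 1 : Nat) : Int) + 1 = (((I : Nat) : Int) + 1) + 1 := by push_cast; ring
    rw [hc, PySem.List.pyRange_one_succ_right (a := 1) (b := ((I : Nat) : Int) + 1) (by omega),
        List.foldl_append]
    simp only [List.foldl_cons, List.foldl_nil]
    obtain ⟨ih1, ih2⟩ := ih (by omega)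
    constructor
    · -- first component: the freshly built tmp row tabulates pvF slices (I+1)
      rw [innerA slices _ _ (pvF slices I) (pvF slices (I - 1)) (((I : Nat) : Int) + 1) N
        (fun j hj => pvGetA_map_range _ _ _ _ ih1 (by omega))
        (fun j hj => pvGetA_map_range _ _ _ _ ih2 (by omega)) N le_rfl]
      apply List.map_congr_left
      intro j hj
      simp only [List.mem_range] at hj
      cases j with
      | zero => rw [if_neg (by omega), pvF_zero_col]
      | succ j' =>
        rw [if_pos (show 1 ≤ j' + 1 ∧ j' + 1 ≤ N by omega)]
        have hgslice : pvGet slices (((I : Nat) : Int) + 1 - 1) = slices.getD I 0 := by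
          rw [show ((I : Nat) : Int) + 1 - 1 = ((I : Nat) : Int) by ring]
          simp [pvGet]
        have hguard : (if 2 ≤ ((I : Nat) : Int) + 1 then pvF slices (I - 1) (j' + 1 - 1) else 0) =
            (if 1 ≤ I then pvF slices (I - 1) j' else 0) := by
          by_cases h1I : 1 ≤ I
          · rw [if_pos (by omega), if_pos h1I]
            simp
          · rw [if_neg (by omega), if_neg h1I]
        rw [hgslice, hguard, wA_eq_pvF]
    · -- second component: the old dp1 row, tabulating pvF slices I = pvF slices ((I+1)-1)
      simpa using ih1

-- B's outer loop invariant: after J passes the row tabulates column J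
lemma outerB (slices : List Int) (N : Nat) :
    ((PySem.List.pyRange 0 (N : Int) 1).foldl
      (fun row _ =>
        (PySem.List.pyRange 1 ((slices.length : Int) + 1) 1).foldl
          (fun new i =>
            let take := pvGet slices (i - 1) + (if 2 ≤ i then pvGetA row (i - 2) else 0)
            pvSetA new i (if pvGetA new (i - 1) < take then take else pvGetA new (i - 1)))
          (Array.replicate (slices.length + 1) 0))
      (Array.replicate (slices.length + 1) 0)).toList
    = (List.range (slices.length + 1)).map (fun k => pvF slices k N) := by
  induction N with
  | zero =>
    rw [show ((0 : Nat) : Int) = 0 by norm_num,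
        PySem.List.pyRange_one_eq_nil (a := 0) (b := 0) (by norm_num), List.foldl_nil,
        Array.toList_replicate, replicate_eq_map_range]
    exact List.map_congr_left (fun k _ => (pvF_zero_col slices k).symm)
  | succ N ih =>
    have hc : ((N + 1 : Nat) : Int) = ((N : Nat) : Int) + 1 := by push_cast; ring
    rw [hc, PySem.List.pyRange_one_succ_right (a := 0) (b := ((N : Nat) : Int)) (by omega),
        List.foldl_append]
    simp only [List.foldl_cons, List.foldl_nil]
    rw [innerB slices _ (fun k => pvF slices k N) slices.length
      (fun k hk => pvGetA_map_range _ _ _ _ ih (by omega)) slices.length le_rfl]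
    apply List.map_congr_left
    intro k hk
    simp only [List.mem_range] at hk
    rw [if_pos (by omega), pvScanB_eq_pvF]

-- ===== VERDICT (by name: the statement is the Claim_ definition above) =====
theorem mx_spec : Claim_equal_mx := by
  unfold Claim_equal_mx
  intro n slices _ hpre
  obtain ⟨N, rfl⟩ : ∃ N : Nat, n = (N : Int) := ⟨n.toNat, by unfold Pre_mx at hpre; omega⟩
  unfold Spec_mx
  show mx (N : Int) slices = mx_alt (N : Int) slices
  simp only [mx, mx_alt]
  rw [show (((N : Int)) + 1).toNat = N + 1 from by omega]
  rw [pvGetA_map_range _ (pvF slices slices.length) (N + 1) N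
        (outerA slices N slices.length le_rfl).1 (by omega),
      pvGetA_map_range _ (fun k => pvF slices k N) (slices.length + 1) slices.length
        (outerB slices N) (by omega)]
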